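-- pv_equiv track=rewrite | github.com/Soupazade/Bleach | src/services/formulas.py | apply_experience_gain
-- ===== SOURCE A (Python) =====
-- RUKONGAI_EARLY_GAME_LEVEL_CAP = 10
--
-- RUKONGAI_XP_PER_LEVEL = 15
--
-- def get_xp_required_for_level(level: int) -> int:
--     # Rukongai is tuned as the early-game zone for roughly levels 1-10, so the
--     # opening curve stays intentionally quick and rewarding before later regions scale up.
--     if level >= RUKONGAI_EARLY_GAME_LEVEL_CAP:
--         return 0
--     return max(1, level) * RUKONGAI_XP_PER_LEVEL
--
-- def is_at_level_cap(level: int) -> bool: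
--     return level >= RUKONGAI_EARLY_GAME_LEVEL_CAP
--
-- def apply_experience_gain(
--     current_level: int,
--     current_xp: int,
--     xp_gain: int,
-- ) -> tuple[int, int, int, int]:
--     normalized_gain = max(0, xp_gain)
--     if is_at_level_cap(current_level):
--         return RUKONGAI_EARLY_GAME_LEVEL_CAP, 0, 0, 0
--
--     level = current_level
--     xp = current_xp + normalized_gain
--     levels_gained = 0
--     applied_xp = normalized_gain
--
--     while not is_at_level_cap(level):
--         xp_required = get_xp_required_for_level(level)
--         if xp < xp_required:
--             break
--
--         xp -= xp_required
--         level += 1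
--         levels_gained += 1
--
--     if is_at_level_cap(level):
--         simulated_level = current_level
--         simulated_xp = current_xp
--         applied_until_cap = 0
--
--         while simulated_level < RUKONGAI_EARLY_GAME_LEVEL_CAP and applied_until_cap < normalized_gain:
--             required = get_xp_required_for_level(simulated_level)
--             needed = required - simulated_xp
--             spend = min(needed, normalized_gain - applied_until_cap)
--             applied_until_cap += spend
--             simulated_xp += spend
--             if simulated_xp >= required:
--                 simulated_level += 1
--                 simulated_xp = 0
--
--         return RUKONGAI_EARLY_GAME_LEVEL_CAP, 0, levels_gained, applied_until_cap
--
--     return level, xp, levels_gained, applied_xp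
-- ===== SOURCE B (Python) =====
-- def apply_experience_gain(current_level, current_xp, xp_gain):
--     gain = max(0, xp_gain)
--     if current_level >= 10:
--         return 10, 0, 0, 0
--     level = current_level
--     total = current_xp + gain
--     # every level below 1 costs the same 15 XP: skip them all with one division
--     if level < 1 and total >= 15:
--         cheap = min(1 - level, total // 15)
--         level += cheap
--         total -= 15 * cheap
--     while 1 <= level < 10 and total >= 15 * level:
--         total -= 15 * level
--         level += 1
--     levels_gained = level - current_level
--     if level >= 10:
--         return 10, 0, levels_gained, (gain - total if gain > 0 else 0)
--     return level, total, levels_gained, gain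
-- ===== Notes on version B (the rewrite author's own statement) =====
-- stated objective: simpler
-- what changed: Replaces A's two full simulation loops (level-up walk plus a second spend-to-cap replay) with one pass: the uniform-cost levels below 1 are skipped by a single integer division and the applied-at-cap amount is recovered arithmetically as gain minus leftover XP, so the second loop and the per-level walk below level 1 disappear.
import Mathlib
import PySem

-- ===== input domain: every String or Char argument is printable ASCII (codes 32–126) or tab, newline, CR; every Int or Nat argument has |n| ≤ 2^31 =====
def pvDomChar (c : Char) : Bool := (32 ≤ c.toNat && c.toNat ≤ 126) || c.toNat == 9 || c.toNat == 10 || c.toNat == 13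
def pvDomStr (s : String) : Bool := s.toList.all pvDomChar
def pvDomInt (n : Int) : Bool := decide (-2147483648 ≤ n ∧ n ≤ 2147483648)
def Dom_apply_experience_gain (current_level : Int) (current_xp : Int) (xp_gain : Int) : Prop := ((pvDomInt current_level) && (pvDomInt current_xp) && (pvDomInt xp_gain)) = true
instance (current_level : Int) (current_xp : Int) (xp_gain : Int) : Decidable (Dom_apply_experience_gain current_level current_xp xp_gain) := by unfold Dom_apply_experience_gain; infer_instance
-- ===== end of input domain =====

-- B fuses A's two simulation loops into one pass: levels below 1 (uniform cost 15) are
-- skipped with a single division and the XP applied at the cap is gain minus leftover XP.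

-- ===== PORT A =====
def get_xp_required_for_level (level : Int) : Int :=
  if level ≥ 10 then 0 else max 1 level * 15

-- A's first while loop: level up while xp covers the requirement
def pvLoopA1 (level : Int) (xp : Int) (levels_gained : Int) : Int × Int × Int :=
  if _h : level < 10 then
    let xp_required := get_xp_required_for_level level
    if xp < xp_required then (level, xp, levels_gained)
    else pvLoopA1 (level + 1) (xp - xp_required) (levels_gained + 1)
  else (level, xp, levels_gained)
termination_by (10 - level).toNat
decreasing_by omega

-- A's second while loop: replay the spend until the cap or the gain is exhausted
def pvLoopA2 (simulated_level : Int) (simulated_xp : Int) (applied_until_cap : Int) (gain : Int) : Int :=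
  if _h : simulated_level < 10 ∧ applied_until_cap < gain then
    let required := get_xp_required_for_level simulated_level
    let needed := required - simulated_xp
    let spend := min needed (gain - applied_until_cap)
    let applied' := applied_until_cap + spend
    let simulated_xp' := simulated_xp + spend
    if _h2 : simulated_xp' ≥ required then pvLoopA2 (simulated_level + 1) 0 applied' gain
    else pvLoopA2 simulated_level simulated_xp' applied' gain
  else applied_until_cap
termination_by ((10 - simulated_level).toNat, (gain - applied_until_cap).toNat)
decreasing_by
  · left; omega
  · right
    have h3 : simulated_xp + min (get_xp_required_for_level simulated_level - simulated_xp)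
        (gain - applied_until_cap) < get_xp_required_for_level simulated_level := lt_of_not_ge _h2
    rcases min_cases (get_xp_required_for_level simulated_level - simulated_xp)
        (gain - applied_until_cap) with ⟨h4, _⟩ | ⟨h4, _⟩ <;> omega

def apply_experience_gain (current_level : Int) (current_xp : Int) (xp_gain : Int) : Int × Int × Int × Int :=
  let normalized_gain := max 0 xp_gain
  if current_level ≥ 10 then (10, 0, 0, 0)
  else
    let r := pvLoopA1 current_level (current_xp + normalized_gain) 0
    if r.1 ≥ 10 then (10, 0, r.2.2, pvLoopA2 current_level current_xp 0 normalized_gain)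
    else (r.1, r.2.1, r.2.2, normalized_gain)

-- ===== PORT B =====
-- B's while loop (levels 1..9, requirement 15*level)
def pvLoopB (level : Int) (total : Int) : Int × Int :=
  if _h : 1 ≤ level ∧ level < 10 ∧ 15 * level ≤ total then
    pvLoopB (level + 1) (total - 15 * level)
  else (level, total)
termination_by (10 - level).toNat
decreasing_by omega

def apply_experience_gain_alt (current_level : Int) (current_xp : Int) (xp_gain : Int) : Int × Int × Int × Int :=
  let gain := max 0 xp_gain
  if current_level ≥ 10 then (10, 0, 0, 0)
  else
    let total0 := current_xp + gain
    let s :=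
      if current_level < 1 ∧ 15 ≤ total0 then
        let cheap := min (1 - current_level) (PySem.Int.floordiv total0 15)
        (current_level + cheap, total0 - 15 * cheap)
      else (current_level, total0)
    let r := pvLoopB s.1 s.2
    let levels_gained := r.1 - current_level
    if r.1 ≥ 10 then (10, 0, levels_gained, if gain > 0 then gain - r.2 else 0)
    else (r.1, r.2, levels_gained, gain)

-- ===== PRECONDITION & SPEC =====
def Spec_apply_experience_gain (current_level : Int) (current_xp : Int) (xp_gain : Int) (out : Int × Int × Int × Int) : Prop := out = apply_experience_gain_alt current_level current_xp xp_gain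
instance (current_level : Int) (current_xp : Int) (xp_gain : Int) (out : Int × Int × Int × Int) : Decidable (Spec_apply_experience_gain current_level current_xp xp_gain out) := by unfold Spec_apply_experience_gain; infer_instance

-- ===== CLAIM (what is proved, stated in full; the proofs are below) =====
def Claim_equal_apply_experience_gain : Prop := ∀ (current_level : Int) (current_xp : Int) (xp_gain : Int), Dom_apply_experience_gain current_level current_xp xp_gain → Spec_apply_experience_gain current_level current_xp xp_gain (apply_experience_gain current_level current_xp xp_gain)

-- ===== LEMMAS AND PROOFS =====

-- total XP required to go from `level` up to the cap
def sumreq (level : Int) : Int :=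
  if _h : level < 10 then 15 * max 1 level + sumreq (level + 1) else 0
termination_by (10 - level).toNat
decreasing_by omega

theorem sumreq_nonneg (level : Int) : 0 ≤ sumreq level := by
  rw [sumreq]
  split
  · have := sumreq_nonneg (level + 1)
    have : (1:Int) ≤ max 1 level := le_max_left _ _
    nlinarith [sumreq_nonneg (level + 1)]
  · exact le_refl 0
termination_by (10 - level).toNat
decreasing_by omega

-- characterization of A's first loop: cap reached iff sumreq is covered
theorem loopA1_spec (level xp lg : Int) (hl : level < 10) :
    (sumreq level ≤ xp ∧ pvLoopA1 level xp lg = (10, xp - sumreq level, lg + (10 - level))) ∨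
    (xp < sumreq level ∧ (pvLoopA1 level xp lg).1 < 10) := by
  rw [pvLoopA1, sumreq]
  simp only [hl, dif_pos, get_xp_required_for_level, if_neg (by omega : ¬ level ≥ 10)]
  by_cases hx : xp < max 1 level * 15
  · right
    have h15 : 0 ≤ sumreq (level + 1) := sumreq_nonneg (level + 1)
    constructor
    · nlinarith
    · simp [hx]; omega
  · simp only [if_neg hx]
    by_cases h10 : level + 1 < 10
    · rcases loopA1_spec (level + 1) (xp - max 1 level * 15) (lg + 1) h10 with ⟨h1, h2⟩ | ⟨h1, h2⟩
      · left
        refine ⟨by nlinarith, ?_⟩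
        rw [h2]
        simp only [Prod.mk.injEq]
        and_intros <;> first | trivial | ring
      · right
        exact ⟨by nlinarith, by rw [pvLoopA1] at h2 ⊢; exact h2⟩
    · -- level = 9
      have h9 : level = 9 := by omega
      left
      rw [pvLoopA1]
      simp only [dif_neg (by omega : ¬ level + 1 < 10)]
      rw [sumreq]
      simp only [dif_neg (by omega : ¬ level + 1 < 10)]
      subst h9
      norm_num
      omega
termination_by (10 - level).toNat
decreasing_by omega

theorem sumreq_15 (level : Int) (h : level < 10) : 15 ≤ sumreq level := by
  rw [sumreq]
  simp only [dif_pos h]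
  have := sumreq_nonneg (level + 1)
  have : (1:Int) ≤ max 1 level := le_max_left _ _
  nlinarith

-- A's second loop spends exactly `needed` at every step when the gain covers the cap
theorem loopA2_spec (level sxp ap g : Int) (hl : level < 10) (hg : ap < g)
    (hcov : sumreq level - sxp ≤ g - ap) :
    pvLoopA2 level sxp ap g = ap + (sumreq level - sxp) := by
  rw [pvLoopA2]
  simp only [dif_pos (And.intro hl hg), get_xp_required_for_level,
    if_neg (by omega : ¬ level ≥ 10)]
  have hs1 : 0 ≤ sumreq (level + 1) := sumreq_nonneg (level + 1)
  have hsum : sumreq level = 15 * max 1 level + sumreq (level + 1) := by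
    rw [sumreq]; simp [hl]
  have hneed : max 1 level * 15 - sxp ≤ g - ap := by nlinarith
  have hmin : min (max 1 level * 15 - sxp) (g - ap) = max 1 level * 15 - sxp :=
    min_eq_left hneed
  rw [hmin]
  simp only [dif_pos (by omega : sxp + (max 1 level * 15 - sxp) ≥ max 1 level * 15)]
  by_cases h10 : level + 1 < 10
  · have h15 : 15 ≤ sumreq (level + 1) := sumreq_15 (level + 1) h10
    rw [loopA2_spec (level + 1) 0 (ap + (max 1 level * 15 - sxp)) g h10 (by omega) (by omega)]
    omega
  · rw [pvLoopA2]
    simp only [dif_neg (by omega : ¬ (level + 1 < 10 ∧ ap + (max 1 level * 15 - sxp) < g))]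
    have hz : sumreq (level + 1) = 0 := by rw [sumreq]; simp [h10]
    omega
termination_by (10 - level).toNat
decreasing_by omega

theorem loopA2_zero (level sxp ap : Int) (g : Int) (hg : g ≤ ap) :
    pvLoopA2 level sxp ap g = ap := by
  rw [pvLoopA2]
  simp only [dif_neg (by omega : ¬ (level < 10 ∧ ap < g))]

-- A's first loop and B's loop agree for levels ≥ 1
theorem loopA1_eq_loopB (level xp lg : Int) (h1 : 1 ≤ level) :
    pvLoopA1 level xp lg = ((pvLoopB level xp).1, (pvLoopB level xp).2, lg + ((pvLoopB level xp).1 - level)) := by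
  rw [pvLoopA1, pvLoopB]
  by_cases hl : level < 10
  · simp only [dif_pos hl, get_xp_required_for_level, if_neg (by omega : ¬ level ≥ 10)]
    have hmax : max 1 level = level := max_eq_right h1
    rw [hmax]
    by_cases hx : xp < level * 15
    · simp only [if_pos hx, dif_neg (by omega : ¬ (1 ≤ level ∧ level < 10 ∧ 15 * level ≤ xp))]
      simp
    · simp only [if_neg hx, dif_pos (by constructor; omega; constructor; omega; omega :
        (1 ≤ level ∧ level < 10 ∧ 15 * level ≤ xp))]
      rw [loopA1_eq_loopB (level + 1) (xp - level * 15) (lg + 1) (by omega)]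
      have e2 : xp - level * 15 = xp - 15 * level := by ring
      rw [e2]
      simp only [Prod.mk.injEq]
      and_intros <;> first | trivial | ring
  · simp only [dif_neg hl, dif_neg (by omega : ¬ (1 ≤ level ∧ level < 10 ∧ 15 * level ≤ xp))]
    simp
termination_by (10 - level).toNat
decreasing_by omega

-- B's whole level-up stage (cheap skip + loop) computes A's first loop, for any start level < 10
theorem stage_eq (level xp lg : Int) (hl : level < 10) :
    pvLoopA1 level xp lg =
      (let s := if level < 1 ∧ 15 ≤ xp then
          let cheap := min (1 - level) (PySem.Int.floordiv xp 15)
          (level + cheap, xp - 15 * cheap)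
        else (level, xp)
       let r := pvLoopB s.1 s.2
       (r.1, r.2, lg + (r.1 - level))) := by
  by_cases h1 : 1 ≤ level
  · simp only [if_neg (by omega : ¬ (level < 1 ∧ 15 ≤ xp))]
    exact loopA1_eq_loopB level xp lg h1
  · -- level < 1 : requirement is 15
    by_cases hx : 15 ≤ xp
    · -- one A1 step; relate the cheap counter recursively
      have hq : 1 ≤ PySem.Int.floordiv xp 15 := by
        rw [PySem.Int.le_floordiv_iff_mul_le (by norm_num)]; omega
      have hstep : PySem.Int.floordiv xp 15 = PySem.Int.floordiv (xp - 15) 15 + 1 := by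
        rw [PySem.Int.floordiv_eq_ediv_of_pos (by norm_num),
            PySem.Int.floordiv_eq_ediv_of_pos (by norm_num)]
        omega
      rw [pvLoopA1]
      simp only [dif_pos hl, get_xp_required_for_level, if_neg (by omega : ¬ level ≥ 10)]
      have hmax : max 1 level = 1 := max_eq_left (by omega)
      rw [hmax]
      simp only [if_neg (by omega : ¬ xp < 1 * 15)]
      rw [stage_eq (level + 1) (xp - 1 * 15) (lg + 1) (by omega)]
      simp only [if_pos (And.intro (by omega : level < 1) hx)]
      by_cases h2 : level + 1 < 1 ∧ 15 ≤ xp - 1 * 15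
      · simp only [if_pos h2]
        have hmin : min (1 - level) (PySem.Int.floordiv xp 15)
             = min (1 - (level + 1)) (PySem.Int.floordiv (xp - 1 * 15) 15) + 1 := by
          have e : xp - 1 * 15 = xp - 15 := by ring
          rw [e, hstep]
          omega
        rw [hmin]
        have e1 : level + 1 + min (1 - (level + 1)) (PySem.Int.floordiv (xp - 1 * 15) 15)
            = level + (min (1 - (level + 1)) (PySem.Int.floordiv (xp - 1 * 15) 15) + 1) := by ring
        have e2 : xp - 1 * 15 - 15 * min (1 - (level + 1)) (PySem.Int.floordiv (xp - 1 * 15) 15)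
            = xp - 15 * (min (1 - (level + 1)) (PySem.Int.floordiv (xp - 1 * 15) 15) + 1) := by ring
        rw [e1, e2]
        simp only [Prod.mk.injEq]
        and_intros <;> first | trivial | ring
      · simp only [if_neg h2]
        have hc : min (1 - level) (PySem.Int.floordiv xp 15) = 1 := by
          rcases (by omega : ¬ (level + 1 < 1) ∨ ¬ (15 ≤ xp - 1 * 15)) with h | h
          · -- level = 0
            have : level = 0 := by omega
            subst this
            simp
            omega
          · -- 15 ≤ xp < 30 : floordiv = 1
            have : PySem.Int.floordiv xp 15 = 1 := by
              rw [PySem.Int.floordiv_eq_iff_of_pos (by norm_num)]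
              omega
            rw [this]
            omega
        rw [hc]
        have e2 : xp - 15 * 1 = xp - 1 * 15 := by ring
        rw [e2]
        simp only [Prod.mk.injEq]
        and_intros <;> first | trivial | ring
    · -- xp < 15 : A1 stops at once, B skips cheap and the loop refuses
      rw [pvLoopA1]
      simp only [dif_pos hl, get_xp_required_for_level, if_neg (by omega : ¬ level ≥ 10)]
      have hmax : max 1 level = 1 := max_eq_left (by omega)
      rw [hmax]
      simp only [if_pos (by omega : xp < 1 * 15), if_neg (by omega : ¬ (level < 1 ∧ 15 ≤ xp))]
      rw [pvLoopB]
      simp only [dif_neg (by omega : ¬ (1 ≤ level ∧ level < 10 ∧ 15 * level ≤ xp))]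
      simp
termination_by (10 - level).toNat
decreasing_by omega

-- ===== VERDICT (by name: the statement is the Claim_ definition above) =====
theorem apply_experience_gain_spec : Claim_equal_apply_experience_gain := by
  intro cl cx g _
  unfold Spec_apply_experience_gain apply_experience_gain apply_experience_gain_alt
  set gain := max 0 g with hgain
  by_cases hcap : cl ≥ 10
  · simp [hcap]
  · simp only [if_neg hcap]
    have hcl : cl < 10 := by omega
    rw [stage_eq cl (cx + gain) 0 hcl]
    simp only []
    set s := (if cl < 1 ∧ 15 ≤ cx + gain then
        (cl + min (1 - cl) (PySem.Int.floordiv (cx + gain) 15),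
         cx + gain - 15 * min (1 - cl) (PySem.Int.floordiv (cx + gain) 15))
      else (cl, cx + gain)) with hs
    set r := pvLoopB s.1 s.2 with hr
    by_cases h10 : r.1 ≥ 10
    · simp only [if_pos h10]
      -- cap path: A2 equals gain - leftover (or 0 when gain = 0)
      rcases loopA1_spec cl (cx + gain) 0 hcl with ⟨hcov, heq⟩ | ⟨_, hlt⟩
      · have hr2 : r.2 = cx + gain - sumreq cl := by
          have := heq.symm.trans (stage_eq cl (cx + gain) 0 hcl)
          simp only [← hs, ← hr] at this
          exact congrArg (·.2.1) this |>.symm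
        by_cases hg0 : gain > 0
        · rw [loopA2_spec cl cx 0 gain hcl hg0 (by omega)]
          simp [hg0, hr2]
          omega
        · have : gain = 0 := by omega
          rw [loopA2_zero cl cx 0 gain (by omega)]
          simp [hg0]
      · exfalso
        rw [stage_eq cl (cx + gain) 0 hcl] at hlt
        simp only [← hs, ← hr] at hlt
        omega
    · simp [h10]
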